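-- pv_equiv track=rewrite | github.com/mjhanke/WeThePeople | nlp/shorten_topic.py | abbreviate_topic
-- ===== SOURCE A (Python) =====
-- def abbreviate_topic(topic):
--     """
--     Introduces abbreviations, e.g., Government -> Gov't
--     """
--     abbreviations = {
--         'International': 'Int\'l',
--         'Government': 'Gov\'t',
--     }
--     for full, abbr in abbreviations.items():
--         topic = topic.replace(full, abbr)
--     return topic
-- ===== SOURCE B (Python) =====
-- def abbreviate_topic(topic):
--     """
--     Introduces abbreviations, e.g., Government -> Gov't
--     (single left-to-right scan instead of one full-string pass per abbreviation)
--     """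
--     abbreviations = (('International', "Int'l"), ('Government', "Gov't"))
--     out = []
--     i = 0
--     n = len(topic)
--     while i < n:
--         for full, abbr in abbreviations:
--             if topic.startswith(full, i):
--                 out.append(abbr)
--                 i += len(full)
--                 break
--         else:
--             out.append(topic[i])
--             i += 1
--     return ''.join(out)
-- ===== Notes on version B (the rewrite author's own statement) =====
-- stated objective: alternative
-- what changed: Replaces the two sequential full-string .replace passes with a single left-to-right scan that matches either abbreviation key at each position and copies or substitutes as it goes.
import Mathlib
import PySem

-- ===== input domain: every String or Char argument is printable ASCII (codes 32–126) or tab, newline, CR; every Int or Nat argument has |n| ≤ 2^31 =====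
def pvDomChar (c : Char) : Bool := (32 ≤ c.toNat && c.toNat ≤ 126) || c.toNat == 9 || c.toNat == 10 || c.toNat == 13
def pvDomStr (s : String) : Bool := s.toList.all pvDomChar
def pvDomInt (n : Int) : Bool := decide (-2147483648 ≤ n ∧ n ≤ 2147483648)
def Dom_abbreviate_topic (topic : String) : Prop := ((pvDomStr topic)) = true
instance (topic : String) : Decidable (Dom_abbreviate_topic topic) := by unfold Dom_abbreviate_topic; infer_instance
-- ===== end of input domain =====

set_option maxRecDepth 4000


-- B replaces A's two sequential full-string .replace passes by one left-to-right scan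
-- that substitutes either abbreviation where it matches (objective: alternative).

-- ===== PORT A =====
-- literal port: build the dict, then fold `topic = topic.replace(full, abbr)` over its items
def abbreviate_topic (topic : String) : String :=
  let abbreviations : PySem.Dict String String :=
    PySem.Dict.ofList [("International", "Int'l"), ("Government", "Gov't")]
  abbreviations.items.foldl (fun t fa => PySem.Str.replace t fa.1 fa.2) topic

-- ===== PORT B =====
-- Source B's while-loop scan, as structural recursion over the character list
-- (topic.startswith(full, i) on the remaining suffix = isPrefixOf); exact on all inputs.
def abbrScan : List Char → List Char
  | [] => []
  | c :: t =>
    if "International".toList.isPrefixOf (c :: t) then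
      "Int'l".toList ++ abbrScan (t.drop 12)
    else if "Government".toList.isPrefixOf (c :: t) then
      "Gov't".toList ++ abbrScan (t.drop 9)
    else
      c :: abbrScan t
termination_by l => l.length
decreasing_by all_goals simp [List.length_drop]

def abbreviate_topic_alt (topic : String) : String :=
  String.ofList (abbrScan topic.toList)

-- ===== PRECONDITION & SPEC =====
def Spec_abbreviate_topic (topic : String) (out : String) : Prop := out = abbreviate_topic_alt topic
instance (topic : String) (out : String) : Decidable (Spec_abbreviate_topic topic out) := by unfold Spec_abbreviate_topic; infer_instance

-- ===== CLAIM (what is proved, stated in full; the proofs are below) =====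
def Claim_equal_abbreviate_topic : Prop := ∀ (topic : String), Dom_abbreviate_topic topic → Spec_abbreviate_topic topic (abbreviate_topic topic)

-- ===== LEMMAS AND PROOFS =====

-- natural recursion equivalent to PySem.Chars.replace for a NONEMPTY pattern
def repN (old new : List Char) : List Char → List Char
  | [] => []
  | c :: t =>
    if old.isPrefixOf (c :: t) then new ++ repN old new (t.drop (old.length - 1))
    else c :: repN old new t
termination_by l => l.length
decreasing_by all_goals simp [List.length_drop]

lemma replace_go_eq (old new : List Char) (hold : old ≠ []) :
    ∀ (fuel : Nat) (l acc : List Char), l.length ≤ fuel →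
      PySem.Chars.replace.go old new fuel l acc = acc.reverse ++ repN old new l := by
  intro fuel
  induction fuel with
  | zero =>
    intro l acc h
    have : l = [] := List.eq_nil_of_length_eq_zero (Nat.le_zero.mp h)
    subst this
    simp [PySem.Chars.replace.go, repN]
  | succ n ih =>
    intro l acc h
    match l with
    | [] => simp [PySem.Chars.replace.go, repN]
    | c :: t =>
      rw [PySem.Chars.replace.go]
      by_cases hp : old.isPrefixOf (c :: t)
      · simp only [hp, if_true]
        have h1 : 1 ≤ old.length := by
          cases old with
          | nil => exact absurd rfl hold
          | cons _ _ => simp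
        have hlen : (List.drop old.length (c :: t)).length ≤ n := by
          simp only [List.length_drop, List.length_cons] at *
          omega
        rw [ih _ _ hlen]
        have hdrop : List.drop old.length (c :: t) = t.drop (old.length - 1) := by
          cases old with
          | nil => exact absurd rfl hold
          | cons o os => simp
        rw [hdrop, repN]
        simp [hp]
      · simp only [hp]
        have hlen : t.length ≤ n := by simp at h; omega
        rw [ih _ _ hlen, repN]
        simp [hp]

lemma replace_eq_repN (s old new : List Char) (hold : old ≠ []) :
    PySem.Chars.replace s old new = repN old new s := by
  rw [PySem.Chars.replace]
  have : old.isEmpty = false := by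
    cases old with | nil => exact absurd rfl hold | cons _ _ => rfl
  rw [this]
  simp only [Bool.false_eq_true, if_false]
  simpa using replace_go_eq old new hold s.length s [] (le_refl _)

-- replacing "International" does not change prefix-matching of an 'I'-free pattern
lemma noI_prefix (l p : List Char) (hp : 'I' ∉ p) :
    (p <+: repN "International".toList "Int'l".toList l ↔ p <+: l) := by
  match l with
  | [] => rw [repN]
  | c :: t =>
    by_cases hm : "International".toList.isPrefixOf (c :: t)
    · rw [repN, if_pos hm]
      have hc : c = 'I' := by
        have h := List.isPrefixOf_iff_prefix.mp hm
        rw [show "International".toList = 'I' :: "nternational".toList from rfl,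
            List.cons_prefix_cons] at h
        exact h.1.symm
      match p with
      | [] => simp
      | d :: p' =>
        have hd : d ≠ 'I' := fun h => hp (h ▸ List.mem_cons_self)
        constructor
        · intro h
          rw [show ("Int'l".toList ++ repN "International".toList "Int'l".toList
                (t.drop ("International".toList.length - 1)))
              = 'I' :: ("nt'l".toList ++ repN "International".toList "Int'l".toList
                (t.drop ("International".toList.length - 1))) from rfl,
              List.cons_prefix_cons] at h
          exact absurd h.1 hd
        · intro h
          rw [hc, List.cons_prefix_cons] at h
          exact absurd h.1 hd
    · rw [repN, if_neg hm]
      match p with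
      | [] => simp
      | d :: p' =>
        have hp' : 'I' ∉ p' := fun h => hp (List.mem_cons_of_mem _ h)
        rw [List.cons_prefix_cons, List.cons_prefix_cons, noI_prefix t p' hp']
termination_by l.length
decreasing_by all_goals simp

-- push repN through a prefix none of whose characters can start the pattern
lemma repN_append (old new : List Char) (h1 : old ≠ []) (hd0 : Char)
    (hhd : old.head h1 = hd0) :
    ∀ (pre x : List Char), (∀ c ∈ pre, c ≠ hd0) →
      repN old new (pre ++ x) = pre ++ repN old new x := by
  intro pre
  induction pre with
  | nil => intro x _; simp
  | cons d pre' ihp =>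
    intro x hc
    have hnp : ¬ old.isPrefixOf (d :: (pre' ++ x)) := by
      intro hpf
      have hpp := List.isPrefixOf_iff_prefix.mp hpf
      cases old with
      | nil => exact absurd rfl h1
      | cons o os =>
        rw [List.cons_prefix_cons] at hpp
        exact (hc d List.mem_cons_self) (hpp.1 ▸ hhd ▸ rfl)
    rw [List.cons_append, repN, if_neg hnp,
        ihp x (fun c hcm => hc c (List.mem_cons_of_mem _ hcm))]
    simp

-- main: the two sequential replaces equal the single scan
lemma abbrScan_cons (c : Char) (t : List Char) :
    abbrScan (c :: t) =
      if "International".toList.isPrefixOf (c :: t) then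
        "Int'l".toList ++ abbrScan (t.drop 12)
      else if "Government".toList.isPrefixOf (c :: t) then
        "Gov't".toList ++ abbrScan (t.drop 9)
      else c :: abbrScan t := by
  rw [abbrScan]

lemma two_replace_eq_scan (l : List Char) :
    repN "Government".toList "Gov't".toList
      (repN "International".toList "Int'l".toList l) = abbrScan l := by
  have gov : "Government".toList = 'G' :: "overnment".toList := by decide
  match l with
  | [] => rw [repN, repN, abbrScan]
  | c :: t =>
    by_cases hI : "International".toList.isPrefixOf (c :: t)
    · rw [repN, if_pos hI,
          show "International".toList.length - 1 = 12 by decide,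
          repN_append "Government".toList "Gov't".toList (by decide) 'G' (by decide)
            "Int'l".toList _ (by simp),
          two_replace_eq_scan (t.drop 12), abbrScan_cons, if_pos hI]
    · by_cases hG : "Government".toList.isPrefixOf (c :: t)
      · obtain ⟨r, hr⟩ := List.isPrefixOf_iff_prefix.mp hG
        rw [gov, List.cons_append] at hr
        obtain ⟨hc, ht⟩ := List.cons_eq_cons.mp hr
        subst hc; subst ht
        conv_lhs => rw [← List.cons_append,
          repN_append "International".toList "Int'l".toList (by decide) 'I' (by decide)
            ('G' :: "overnment".toList) r (by simp),
          List.cons_append, repN]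
        rw [if_pos (by
          rw [List.isPrefixOf_iff_prefix, gov, List.cons_prefix_cons]
          exact ⟨rfl, "overnment".toList.prefix_append _⟩)]
        rw [show ("Government".toList.length - 1 : Nat) = "overnment".toList.length by decide,
            List.drop_left, two_replace_eq_scan r, abbrScan_cons, if_neg hI, if_pos hG,
            show (9 : Nat) = "overnment".toList.length by decide, List.drop_left]
      · have hng : ¬ "Government".toList.isPrefixOf
            (c :: repN "International".toList "Int'l".toList t) := by
          intro h
          have hpp := List.isPrefixOf_iff_prefix.mp h
          rw [gov, List.cons_prefix_cons] at hpp
          exact hG (List.isPrefixOf_iff_prefix.mpr (by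
            rw [gov, List.cons_prefix_cons]
            exact ⟨hpp.1, (noI_prefix t "overnment".toList (by simp)).mp hpp.2⟩))
        rw [repN, if_neg hI, repN, if_neg hng, two_replace_eq_scan t,
            abbrScan_cons, if_neg hI, if_neg hG]
termination_by l.length
decreasing_by
  all_goals simp [List.length_drop]
  all_goals (subst ht; simp; try omega)

lemma abbreviate_topic_eq_two_replace (topic : String) :
    abbreviate_topic topic =
      PySem.Str.replace (PySem.Str.replace topic "International" "Int'l")
        "Government" "Gov't" := rfl

-- ===== VERDICT (by name: the statement is the Claim_ definition above) =====
theorem abbreviate_topic_spec : Claim_equal_abbreviate_topic := by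
  intro topic _
  unfold Spec_abbreviate_topic abbreviate_topic_alt
  rw [abbreviate_topic_eq_two_replace, PySem.Str.replace, PySem.Str.replace]
  rw [replace_eq_repN _ _ _ (by decide), replace_eq_repN _ _ _ (by decide)]
  simp only [String.toList_ofList]
  rw [two_replace_eq_scan]
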